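-- pv_equiv track=rewrite | github.com/RamiSabbagh23/mobile_robot_ws | src/autonomous_explorer/autonomous_explorer/astar_plan.py | build_disk_offsets
-- ===== SOURCE A (Python) =====
-- def build_disk_offsets(r: int):
--     offs = []
--     r2 = r*r
--     for dy in range(-r, r+1):
--         for dx in range(-r, r+1):
--             if dx*dx + dy*dy <= r2:
--                 offs.append((dx, dy))
--     return offs
-- ===== SOURCE B (Python) =====
-- def build_disk_offsets(r: int):
--     def isqrt(m):
--         k = 0
--         while (k + 1) * (k + 1) <= m:
--             k += 1
--         return k
--     offs = []
--     r2 = r * r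
--     for dy in range(-r, r + 1):
--         dxmax = isqrt(r2 - dy * dy)
--         for dx in range(-dxmax, dxmax + 1):
--             offs.append((dx, dy))
--     return offs
-- ===== Notes on version B (the rewrite author's own statement) =====
-- stated objective: alternative
-- what changed: B replaces the per-point distance test over the full (2r+1)^2 grid by computing, for each row dy, the exact half-width dxmax = floor(sqrt(r^2-dy^2)) with a hand-written integer-sqrt loop and emitting the row as a plain range with no test.
import Mathlib
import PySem

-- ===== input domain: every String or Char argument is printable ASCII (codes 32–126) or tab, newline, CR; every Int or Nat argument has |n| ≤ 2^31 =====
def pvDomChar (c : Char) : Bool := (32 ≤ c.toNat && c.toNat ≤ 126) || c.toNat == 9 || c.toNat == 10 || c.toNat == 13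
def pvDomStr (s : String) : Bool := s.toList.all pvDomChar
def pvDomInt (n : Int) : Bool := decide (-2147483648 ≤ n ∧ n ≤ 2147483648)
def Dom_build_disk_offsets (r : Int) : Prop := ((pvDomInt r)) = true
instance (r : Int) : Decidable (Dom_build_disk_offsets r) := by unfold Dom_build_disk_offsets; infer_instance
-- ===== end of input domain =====

-- B computes each row's half-width with an integer-sqrt loop instead of testing every grid point; alternative decomposition, same output.

-- ===== PORT A =====
def build_disk_offsets (r : Int) : List (Int × Int) :=
  let r2 := r * r
  (PySem.List.pyRange (-r) (r + 1) 1).foldl (fun offs dy =>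
    (PySem.List.pyRange (-r) (r + 1) 1).foldl (fun offs dx =>
      if dx * dx + dy * dy ≤ r2 then offs ++ [(dx, dy)] else offs) offs) []

-- ===== PORT B =====
-- the 'while (k+1)*(k+1) <= m: k += 1' loop of Source B's isqrt; the '0 ≤ k' guard only makes it total
def isqrtLoop (m k : Int) : Int :=
  if h : (k + 1) * (k + 1) ≤ m ∧ 0 ≤ k then isqrtLoop m (k + 1) else k
termination_by (m - k * k).toNat
decreasing_by
  obtain ⟨h1, h2⟩ := h
  have : k * k < (k + 1) * (k + 1) := by nlinarith
  omega

def isqrt (m : Int) : Int := isqrtLoop m 0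

def build_disk_offsets_alt (r : Int) : List (Int × Int) :=
  let r2 := r * r
  (PySem.List.pyRange (-r) (r + 1) 1).foldl (fun offs dy =>
    let dxmax := isqrt (r2 - dy * dy)
    (PySem.List.pyRange (-dxmax) (dxmax + 1) 1).foldl (fun offs dx =>
      offs ++ [(dx, dy)]) offs) []

-- ===== PRECONDITION & SPEC =====
def Spec_build_disk_offsets (r : Int) (out : List (Int × Int)) : Prop := out = build_disk_offsets_alt r
instance (r : Int) (out : List (Int × Int)) : Decidable (Spec_build_disk_offsets r out) := by unfold Spec_build_disk_offsets; infer_instance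

-- ===== CLAIM (what is proved, stated in full; the proofs are below) =====
def Claim_equal_build_disk_offsets : Prop := ∀ (r : Int), Dom_build_disk_offsets r → Spec_build_disk_offsets r (build_disk_offsets r)

-- ===== LEMMAS AND PROOFS =====

-- characterisation of the while-loop: largest k with k*k ≤ m
theorem isqrtLoop_char (m k : Int) (hk : 0 ≤ k) (hkm : k * k ≤ m) :
    0 ≤ isqrtLoop m k ∧ isqrtLoop m k * isqrtLoop m k ≤ m ∧
      m < (isqrtLoop m k + 1) * (isqrtLoop m k + 1) := by
  rw [isqrtLoop]
  split_ifs with h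
  · exact isqrtLoop_char m (k + 1) (by omega) h.1
  · refine ⟨hk, hkm, ?_⟩
    rcases not_and_or.mp h with h' | h'
    · omega
    · omega
termination_by (m - k * k).toNat
decreasing_by
  obtain ⟨h1, h2⟩ := h
  have : k * k < (k + 1) * (k + 1) := by nlinarith

  omega

theorem isqrt_char (m : Int) (hm : 0 ≤ m) :
    0 ≤ isqrt m ∧ isqrt m * isqrt m ≤ m ∧ m < (isqrt m + 1) * (isqrt m + 1) :=
  isqrtLoop_char m 0 le_rfl (by simpa using hm)

-- filtering an interval out of a wider range gives the interval
theorem filter_pyRange_interval (a b lo hi : Int) (h1 : a ≤ lo) (h2 : lo ≤ hi + 1) (h3 : hi + 1 ≤ b)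
    (p : Int → Bool) (hp : ∀ x, a ≤ x → x < b → (p x = true ↔ lo ≤ x ∧ x ≤ hi)) :
    (PySem.List.pyRange a b 1).filter p = PySem.List.pyRange lo (hi + 1) 1 := by
  rw [PySem.List.pyRange_one_append a lo b h1 (by omega),
      PySem.List.pyRange_one_append lo (hi + 1) b h2 h3]
  rw [List.filter_append, List.filter_append]
  have e1 : (PySem.List.pyRange a lo 1).filter p = [] := by
    rw [List.filter_eq_nil_iff]
    intro x hx
    rw [PySem.List.mem_pyRange_one] at hx
    simp only [Bool.not_eq_true]
    rcases Bool.eq_false_or_eq_true (p x) with h | h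
    · exact absurd ((hp x hx.1 (by omega)).mp h).1 (by omega)
    · exact h
  have e2 : (PySem.List.pyRange lo (hi + 1) 1).filter p = PySem.List.pyRange lo (hi + 1) 1 := by
    rw [List.filter_eq_self]
    intro x hx
    rw [PySem.List.mem_pyRange_one] at hx
    exact (hp x (by omega) (by omega)).mpr ⟨hx.1, by omega⟩
  have e3 : (PySem.List.pyRange (hi + 1) b 1).filter p = [] := by
    rw [List.filter_eq_nil_iff]
    intro x hx
    rw [PySem.List.mem_pyRange_one] at hx
    simp only [Bool.not_eq_true]
    rcases Bool.eq_false_or_eq_true (p x) with h | h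
    · exact absurd ((hp x (by omega) hx.2).mp h).2 (by omega)
    · exact h
  rw [e1, e2, e3]
  simp

-- one row of A, as a filtered range, equals one row of B
theorem row_eq (r dy : Int) (hdy : -r ≤ dy) (hdy2 : dy < r + 1) :
    (PySem.List.pyRange (-r) (r + 1) 1).filter (fun dx => decide (dx * dx + dy * dy ≤ r * r)) =
      PySem.List.pyRange (-(isqrt (r * r - dy * dy))) (isqrt (r * r - dy * dy) + 1) 1 := by
  have hr : 0 ≤ r := by omega
  have hm : 0 ≤ r * r - dy * dy := by nlinarith
  obtain ⟨hk0, hk1, hk2⟩ := isqrt_char (r * r - dy * dy) hm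
  set k := isqrt (r * r - dy * dy) with hkdef
  have hkr : k ≤ r := by nlinarith
  refine filter_pyRange_interval (-r) (r + 1) (-k) k (by omega) (by omega) (by omega) _ ?_
  intro x _ _
  simp only [decide_eq_true_eq]
  constructor
  · intro hx
    constructor
    · by_contra hc
      push Not at hc
      have : k + 1 ≤ -x := by omega
      nlinarith
    · by_contra hc
      push Not at hc
      have : k + 1 ≤ x := by omega
      nlinarith
  · rintro ⟨hlo, hhi⟩
    nlinarith

-- ===== VERDICT (by name: the statement is the Claim_ definition above) =====
theorem build_disk_offsets_spec : Claim_equal_build_disk_offsets := by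
  intro r _
  unfold Spec_build_disk_offsets build_disk_offsets build_disk_offsets_alt
  simp only []
  refine PySem.List.foldl_congr_mem _ _ _ _ ?_
  intro offs dy hdy
  rw [PySem.List.mem_pyRange_one] at hdy
  rw [PySem.List.foldl_append_ite (fun dx => dx * dx + dy * dy ≤ r * r) (fun dx => (dx, dy)),
      PySem.List.foldl_append_singleton_eq_map]
  rw [row_eq r dy hdy.1 hdy.2]
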